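-- pv_equiv track=rewrite | github.com/AlexisGR117/AYED | Programas/Amigos.py | parejas
-- ===== SOURCE A (Python) =====
-- def parejas(amigos, cont, s):
--     if cont == amigos + 1:
--         return s
--     s.append([cont])
--     for i in range(1, amigos + 1):
--         if i > cont and [cont, i] not in s:
--             s.append([cont, i])
--         elif i < cont and [i, cont] not in s:
--             s.append([i, cont])
--     return parejas(amigos, cont + 1, s)
-- ===== SOURCE B (Python) =====
-- def parejas(amigos, cont, s):
--     # Each unordered pair is emitted exactly once, at the first of its two
--     # endpoints that the sweep visits, so membership is tested against the
--     # ORIGINAL s only -- the scan over the growing result disappears.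
--     res = []
--     for c in range(cont, amigos + 1):
--         res.append([c])
--         for i in range(1, cont):
--             if [i, c] not in s:
--                 res.append([i, c])
--         for i in range(max(c + 1, 1), amigos + 1):
--             if [c, i] not in s:
--                 res.append([c, i])
--     s.extend(res)
--     return s
-- ===== Notes on version B (the rewrite author's own statement) =====
-- stated objective: faster
-- what changed: B builds the new entries in a fresh list, emitting each unordered pair exactly once at the first endpoint the sweep visits (split into an i<cont and an i>c range), so membership is tested only against the original s instead of scanning the ever-growing result; the tail recursion becomes a loop.
import Mathlib
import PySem

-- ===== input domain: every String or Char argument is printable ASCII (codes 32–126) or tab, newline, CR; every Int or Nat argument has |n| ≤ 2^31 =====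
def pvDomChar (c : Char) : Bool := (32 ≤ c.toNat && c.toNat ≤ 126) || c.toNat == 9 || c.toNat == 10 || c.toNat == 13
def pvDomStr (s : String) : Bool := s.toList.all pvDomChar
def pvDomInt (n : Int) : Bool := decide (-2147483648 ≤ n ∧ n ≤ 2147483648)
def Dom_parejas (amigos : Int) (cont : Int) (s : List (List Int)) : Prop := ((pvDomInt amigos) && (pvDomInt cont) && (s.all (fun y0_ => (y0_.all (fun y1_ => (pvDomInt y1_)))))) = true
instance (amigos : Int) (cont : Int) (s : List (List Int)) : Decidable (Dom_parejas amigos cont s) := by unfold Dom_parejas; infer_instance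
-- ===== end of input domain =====

-- B emits every unordered pair once, at the first endpoint the sweep visits, so the
-- membership scan over the GROWING result disappears (only the original s is consulted);
-- return-value equivalence only (both Pythons mutate the caller's s in place).

-- ===== PORT A =====
-- A's recursion advances cont until cont == amigos+1; for cont > amigos+1 the Python
-- recursion never reaches its base case (RecursionError), which Pre_ excludes; fuel
-- counts the remaining recursive calls (amigos + 1 - cont) exactly on Pre_.
def stepA (cont : Int) (s : List (List Int)) (i : Int) : List (List Int) :=
  if i > cont ∧ [cont, i] ∉ s then s ++ [[cont, i]]
  else if i < cont ∧ [i, cont] ∉ s then s ++ [[i, cont]]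
  else s

def parejasGoA (fuel : Nat) (amigos : Int) (cont : Int) (s : List (List Int)) : List (List Int) :=
  match fuel with
  | 0 => s
  | fuel + 1 =>
    if cont = amigos + 1 then s
    else
      let s1 := s ++ [[cont]]
      let s2 := (PySem.List.pyRange 1 (amigos + 1) 1).foldl (stepA cont) s1
      parejasGoA fuel amigos (cont + 1) s2

def parejas (amigos : Int) (cont : Int) (s : List (List Int)) : List (List Int) :=
  parejasGoA (amigos + 1 - cont).toNat amigos cont s

-- ===== PORT B =====
def parejas_alt (amigos : Int) (cont : Int) (s : List (List Int)) : List (List Int) :=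
  let res : List (List Int) := []
  let res := (PySem.List.pyRange cont (amigos + 1) 1).foldl (fun res c =>
    let res := res ++ [[c]]
    let res := (PySem.List.pyRange 1 cont 1).foldl
      (fun res i => if [i, c] ∉ s then res ++ [[i, c]] else res) res
    (PySem.List.pyRange (max (c + 1) 1) (amigos + 1) 1).foldl
      (fun res i => if [c, i] ∉ s then res ++ [[c, i]] else res) res) res
  s ++ res

-- ===== PRECONDITION & SPEC =====
-- Pre_ excludes cont > amigos + 1, where Python A's recursion never reaches its base
-- case and raises RecursionError.
def Pre_parejas (amigos : Int) (cont : Int) (s : List (List Int)) : Prop := cont ≤ amigos + 1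
instance (amigos : Int) (cont : Int) (s : List (List Int)) : Decidable (Pre_parejas amigos cont s) := by unfold Pre_parejas; infer_instance
def pvWitness_parejas : Int × Int × List (List Int) := (3, 1, [])

def Spec_parejas (amigos : Int) (cont : Int) (s : List (List Int)) (out : List (List Int)) : Prop := out = parejas_alt amigos cont s
instance (amigos : Int) (cont : Int) (s : List (List Int)) (out : List (List Int)) : Decidable (Spec_parejas amigos cont s out) := by unfold Spec_parejas; infer_instance

-- ===== CLAIM =====
def Claim_equal_parejas : Prop := ∀ (amigos : Int) (cont : Int) (s : List (List Int)), Dom_parejas amigos cont s → Pre_parejas amigos cont s → Spec_parejas amigos cont s (parejas amigos cont s)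

-- ===== LEMMAS AND PROOFS =====

-- the block B generates for one value c (filter/map form of B's two inner loops)
def blk (s0 : List (List Int)) (amigos cont0 c : Int) : List (List Int) :=
  [[c]] ++ ((PySem.List.pyRange 1 cont0 1).filter (fun i => decide ([i, c] ∉ s0))).map (fun i => [i, c])
        ++ ((PySem.List.pyRange (max (c + 1) 1) (amigos + 1) 1).filter (fun i => decide ([c, i] ∉ s0))).map (fun i => [c, i])

theorem B_eq (amigos cont0 : Int) (s0 : List (List Int)) :
    parejas_alt amigos cont0 s0
      = s0 ++ (PySem.List.pyRange cont0 (amigos + 1) 1).flatMap (blk s0 amigos cont0) := by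
  unfold parejas_alt
  simp only [PySem.List.foldl_append_ite]
  have h : ∀ (res : List (List Int)) (c : Int),
      res ++ [[c]]
        ++ ((PySem.List.pyRange 1 cont0 1).filter (fun i => decide ([i, c] ∉ s0))).map (fun i => [i, c])
        ++ ((PySem.List.pyRange (max (c + 1) 1) (amigos + 1) 1).filter (fun i => decide ([c, i] ∉ s0))).map (fun i => [c, i])
      = res ++ blk s0 amigos cont0 c := by
    intro res c; simp [blk]
  simp only [h]
  rw [PySem.List.foldl_append_eq_flatMap]
  simp

-- every pair in the generated region has first component < c
theorem mem_blk (s0 : List (List Int)) (amigos cont0 c x y : Int) :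
    [x, y] ∈ blk s0 amigos cont0 c
      ↔ ((1 ≤ x ∧ x < cont0) ∧ [x, c] ∉ s0 ∧ c = y)
        ∨ ((max (c + 1) 1 ≤ y ∧ y < amigos + 1) ∧ [c, y] ∉ s0 ∧ c = x) := by
  simp only [blk, List.mem_append, List.mem_map, List.mem_filter,
    PySem.List.mem_pyRange_one, decide_eq_true_eq, List.mem_singleton, List.cons.injEq,
    and_true, reduceCtorEq, and_false, false_or]
  constructor
  · rintro (⟨a, ⟨ha, hans⟩, hax, hcy⟩ | ⟨a, ⟨ha, hans⟩, hcx, hay⟩)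
    · subst hax; subst hcy; exact Or.inl ⟨ha, hans, rfl⟩
    · subst hcx; subst hay; exact Or.inr ⟨ha, hans, rfl⟩
  · rintro (⟨ha, hans, hcy⟩ | ⟨ha, hans, hcx⟩)
    · subst hcy; exact Or.inl ⟨x, ⟨ha, hans⟩, rfl, rfl⟩
    · subst hcx; exact Or.inr ⟨y, ⟨ha, hans⟩, rfl, rfl⟩

-- every pair in the region generated by steps cont0..c-1 has first component < c
theorem G_first_lt (s0 : List (List Int)) (amigos cont0 c : Int) (hcc : cont0 ≤ c) :
    ∀ x y : Int, [x, y] ∈ (PySem.List.pyRange cont0 c 1).flatMap (blk s0 amigos cont0) → x < c := by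
  intro x y hx
  simp only [List.mem_flatMap, PySem.List.mem_pyRange_one] at hx
  obtain ⟨c', hc', hblk⟩ := hx
  rw [mem_blk] at hblk
  rcases hblk with ⟨ha, _, hcy⟩ | ⟨ha, _, hcx⟩ <;> omega

-- [i,c] (with 1 ≤ i < c ≤ amigos) lies in the region generated before step c iff
-- cont0 ≤ i and it is not already in s0
theorem mem_G_low (s0 : List (List Int)) (amigos cont0 c i : Int)
    (hcc : cont0 ≤ c) (hca : c ≤ amigos) (h1 : 1 ≤ i) (h2 : i < c) :
    ([i, c] ∈ (PySem.List.pyRange cont0 c 1).flatMap (blk s0 amigos cont0))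
      ↔ (cont0 ≤ i ∧ [i, c] ∉ s0) := by
  simp only [List.mem_flatMap, PySem.List.mem_pyRange_one]
  constructor
  · rintro ⟨c', hc', hblk⟩
    rw [mem_blk] at hblk
    rcases hblk with ⟨ha, _, hcy⟩ | ⟨ha, hans, hcx⟩
    · omega
    · subst hcx; exact ⟨hc'.1, hans⟩
  · rintro ⟨hci, hns⟩
    refine ⟨i, by omega, ?_⟩
    rw [mem_blk]
    exact Or.inr ⟨⟨by omega, by omega⟩, hns, rfl⟩

theorem fold_low (s0 : List (List Int)) (cont0 c : Int) :
    ∀ (L : List Int) (acc : List (List Int)), L.Nodup → (∀ i ∈ L, i < c) →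
      (∀ i ∈ L, ([i, c] ∈ acc ↔ ([i, c] ∈ s0 ∨ cont0 ≤ i))) →
      L.foldl (stepA c) acc
        = acc ++ (L.filter (fun i => decide (i < cont0 ∧ [i, c] ∉ s0))).map (fun i => [i, c]) := by
  intro L
  induction L with
  | nil => intro acc _ _ _; simp
  | cons i L ih =>
    intro acc hnd hlt hmem
    have hic : i < c := hlt i (by simp)
    have hm := hmem i (by simp)
    have hnd' := hnd.of_cons
    have hine : i ∉ L := (List.nodup_cons.mp hnd).1
    by_cases hnew : i < cont0 ∧ [i, c] ∉ s0
    · have hnotacc : [i, c] ∉ acc := by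
        rw [hm]; push_neg; exact ⟨hnew.2, by omega⟩
      have hstep : stepA c acc i = acc ++ [[i, c]] := by
        rw [stepA, if_neg (by push_neg; intro h; omega), if_pos ⟨hic, hnotacc⟩]
      rw [List.foldl_cons, hstep, ih (acc ++ [[i, c]]) hnd'
        (fun j hj => hlt j (by simp [hj]))
        (fun j hj => by
          have hji : j ≠ i := fun h => hine (h ▸ hj)
          have hmj := hmem j (by simp [hj])
          simp only [List.mem_append, List.mem_singleton]
          rw [← hmj]
          constructor
          · rintro (h | h)
            · exact h
            · have hj2 : j = i := by simpa using h
              exact absurd hj2 hji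
          · exact Or.inl)]
      rw [List.filter_cons_of_pos (by simpa using hnew), List.map_cons]
      simp
    · have hstep : stepA c acc i = acc := by
        rw [stepA, if_neg (by push_neg; intro h; omega), if_neg]
        push_neg; intro _
        rw [hm]
        push_neg at hnew
        by_cases hs : [i, c] ∈ s0
        · exact Or.inl hs
        · right; by_contra hlt2; exact hs (hnew (by omega))
      rw [List.foldl_cons, hstep, ih acc hnd' (fun j hj => hlt j (by simp [hj]))
        (fun j hj => hmem j (by simp [hj])),
        List.filter_cons_of_neg (by simpa using hnew)]

theorem fold_high (s0 : List (List Int)) (c : Int) :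
    ∀ (L : List Int) (acc : List (List Int)), L.Nodup → (∀ i ∈ L, c < i) →
      (∀ i ∈ L, ([c, i] ∈ acc ↔ [c, i] ∈ s0)) →
      L.foldl (stepA c) acc
        = acc ++ (L.filter (fun i => decide ([c, i] ∉ s0))).map (fun i => [c, i]) := by
  intro L
  induction L with
  | nil => intro acc _ _ _; simp
  | cons i L ih =>
    intro acc hnd hlt hmem
    have hic : c < i := hlt i (by simp)
    have hm := hmem i (by simp)
    have hnd' := hnd.of_cons
    have hine : i ∉ L := (List.nodup_cons.mp hnd).1
    by_cases hnew : [c, i] ∉ s0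
    · have hnotacc : [c, i] ∉ acc := by rw [hm]; exact hnew
      have hstep : stepA c acc i = acc ++ [[c, i]] := by
        rw [stepA, if_pos ⟨hic, hnotacc⟩]
      rw [List.foldl_cons, hstep, ih (acc ++ [[c, i]]) hnd'
        (fun j hj => hlt j (by simp [hj]))
        (fun j hj => by
          have hji : j ≠ i := fun h => hine (h ▸ hj)
          have hmj := hmem j (by simp [hj])
          simp only [List.mem_append, List.mem_singleton]
          rw [← hmj]
          constructor
          · rintro (h | h)
            · exact h
            · have hj2 : j = i := by simpa using h
              exact absurd hj2 hji
          · exact Or.inl)]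
      rw [List.filter_cons_of_pos (by simpa using hnew), List.map_cons]
      simp
    · push_neg at hnew
      have hstep : stepA c acc i = acc := by
        rw [stepA, if_neg (by push_neg; intro _; rw [hm]; exact hnew), if_neg (by push_neg; intro h; omega)]
      rw [List.foldl_cons, hstep, ih acc hnd' (fun j hj => hlt j (by simp [hj]))
        (fun j hj => hmem j (by simp [hj])),
        List.filter_cons_of_neg (by simpa using hnew)]

-- restricting the low filter to the range B actually uses
theorem filter_low_eq (s0 : List (List Int)) (cont0 c : Int) (hcc : cont0 ≤ c) :
    (PySem.List.pyRange 1 c 1).filter (fun i => decide (i < cont0 ∧ [i, c] ∉ s0))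
      = (PySem.List.pyRange 1 cont0 1).filter (fun i => decide ([i, c] ∉ s0)) := by
  by_cases h1 : cont0 ≤ 1
  · rw [PySem.List.pyRange_one_eq_nil h1, List.filter_nil, List.filter_eq_nil_iff]
    intro i hi
    rw [PySem.List.mem_pyRange_one] at hi
    simp only [decide_eq_true_eq, not_and]
    intro h; omega
  · rw [PySem.List.pyRange_one_append 1 cont0 c (by omega) hcc, List.filter_append]
    have h2 : (PySem.List.pyRange cont0 c 1).filter (fun i => decide (i < cont0 ∧ [i, c] ∉ s0)) = [] := by
      rw [List.filter_eq_nil_iff]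
      intro i hi
      rw [PySem.List.mem_pyRange_one] at hi
      simp only [decide_eq_true_eq, not_and]
      intro h; omega
    rw [h2, List.append_nil]
    apply List.filter_congr
    intro i hi
    rw [PySem.List.mem_pyRange_one] at hi
    simp only [decide_eq_true_eq, decide_eq_decide]
    constructor
    · exact fun h => h.2
    · exact fun h => ⟨by omega, h⟩

-- A's step-c inner loop, started on the region plus [[c]], produces exactly blk c
theorem step_eq (s0 : List (List Int)) (amigos cont0 c : Int)
    (hcc : cont0 ≤ c) (hca : c ≤ amigos) :
    (PySem.List.pyRange 1 (amigos + 1) 1).foldl (stepA c)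
        (s0 ++ (PySem.List.pyRange cont0 c 1).flatMap (blk s0 amigos cont0) ++ [[c]])
      = s0 ++ (PySem.List.pyRange cont0 c 1).flatMap (blk s0 amigos cont0)
          ++ blk s0 amigos cont0 c := by
  set G := (PySem.List.pyRange cont0 c 1).flatMap (blk s0 amigos cont0) with hG
  have hGfst := G_first_lt s0 amigos cont0 c hcc
  rw [← hG] at hGfst
  -- membership fact for the high segment, with any low-pair suffix appended
  have hhigh : ∀ (E1m : List Int), (∀ j ∈ E1m, j < c) → ∀ i : Int, c < i →
      ([c, i] ∈ (s0 ++ G ++ [[c]]) ++ E1m.map (fun j => [j, c]) ↔ [c, i] ∈ s0) := by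
    intro E1m hE i hi
    simp only [List.mem_append, List.mem_map, List.mem_singleton]
    constructor
    · rintro (((h | h) | h) | ⟨j, hj, he⟩)
      · exact h
      · exact absurd (hGfst c i h) (lt_irrefl c)
      · exact absurd h (by simp)
      · obtain ⟨e1, e2⟩ : j = c ∧ c = i := by simpa using he
        exact absurd (e1 ▸ hE j hj) (lt_irrefl c)
    · intro h; exact Or.inl (Or.inl (Or.inl h))
  by_cases hc1 : 1 ≤ c
  · -- the inner range splits as [1,c) ++ [c] ++ (c, amigos]
    have hsplit : PySem.List.pyRange 1 (amigos + 1) 1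
        = PySem.List.pyRange 1 c 1 ++ (c :: PySem.List.pyRange (c + 1) (amigos + 1) 1) := by
      rw [PySem.List.pyRange_one_append 1 c (amigos + 1) hc1 (by omega),
        show PySem.List.pyRange c (amigos + 1) 1 = c :: PySem.List.pyRange (c + 1) (amigos + 1) 1
          from PySem.List.pyRange_one_cons (by omega)]
    rw [hsplit, List.foldl_append]
    rw [fold_low s0 cont0 c (PySem.List.pyRange 1 c 1) (s0 ++ G ++ [[c]])
      (PySem.List.nodup_pyRange_one _ _)
      (fun i hi => by rw [PySem.List.mem_pyRange_one] at hi; omega)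
      (fun i hi => by
        rw [PySem.List.mem_pyRange_one] at hi
        simp only [List.mem_append, List.mem_singleton]
        rw [hG, mem_G_low s0 amigos cont0 c i hcc hca (by omega) (by omega)]
        constructor
        · rintro ((h | h) | h)
          · exact Or.inl h
          · exact Or.inr h.1
          · exact absurd h (by simp)
        · rintro (h | h)
          · exact Or.inl (Or.inl h)
          · by_cases hs : [i, c] ∈ s0
            · exact Or.inl (Or.inl hs)
            · exact Or.inl (Or.inr ⟨h, hs⟩))]
    rw [List.foldl_cons]
    have hmid : stepA c ((s0 ++ G ++ [[c]]) ++ ((PySem.List.pyRange 1 c 1).filter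
        (fun i => decide (i < cont0 ∧ [i, c] ∉ s0))).map (fun i => [i, c])) c
        = (s0 ++ G ++ [[c]]) ++ ((PySem.List.pyRange 1 c 1).filter
        (fun i => decide (i < cont0 ∧ [i, c] ∉ s0))).map (fun i => [i, c]) := by
      rw [stepA, if_neg (by push_neg; intro h; omega), if_neg (by push_neg; intro h; omega)]
    rw [hmid]
    rw [fold_high s0 c (PySem.List.pyRange (c + 1) (amigos + 1) 1) _
      (PySem.List.nodup_pyRange_one _ _)
      (fun i hi => by rw [PySem.List.mem_pyRange_one] at hi; omega)
      (fun i hi => by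
        rw [PySem.List.mem_pyRange_one] at hi
        exact hhigh _ (fun j hj => by
          have := List.mem_filter.mp hj
          rw [PySem.List.mem_pyRange_one] at this
          omega) i (by omega))]
    rw [filter_low_eq s0 cont0 c hcc]
    have hmax : max (c + 1) 1 = c + 1 := by omega
    simp only [blk, hmax]
    simp [List.append_assoc]
  · -- c < 1: every i in the inner range exceeds c; B's first inner loop range is empty
    rw [fold_high s0 c (PySem.List.pyRange 1 (amigos + 1) 1) (s0 ++ G ++ [[c]])
      (PySem.List.nodup_pyRange_one _ _)
      (fun i hi => by rw [PySem.List.mem_pyRange_one] at hi; omega)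
      (fun i hi => by
        rw [PySem.List.mem_pyRange_one] at hi
        have := hhigh [] (by simp) i (by omega)
        simpa using this)]
    have hE1 : PySem.List.pyRange 1 cont0 1 = [] := PySem.List.pyRange_one_eq_nil (by omega)
    have hmax : max (c + 1) 1 = 1 := by omega
    simp only [blk, hE1, hmax, List.filter_nil, List.map_nil]
    simp [List.append_assoc]

theorem goA_eq (s0 : List (List Int)) (amigos cont0 : Int) :
    ∀ (n : Nat) (c : Int), cont0 ≤ c → c + n = amigos + 1 →
      parejasGoA n amigos c (s0 ++ (PySem.List.pyRange cont0 c 1).flatMap (blk s0 amigos cont0))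
        = s0 ++ (PySem.List.pyRange cont0 (amigos + 1) 1).flatMap (blk s0 amigos cont0) := by
  intro n
  induction n with
  | zero => intro c hc h0; simp at h0; subst h0; simp [parejasGoA]
  | succ n ih =>
    intro c hc h0
    have hne : c ≠ amigos + 1 := by omega
    have hca : c ≤ amigos := by omega
    simp only [parejasGoA, if_neg hne]
    rw [step_eq s0 amigos cont0 c hc hca]
    have hsplit : PySem.List.pyRange cont0 (c + 1) 1
        = PySem.List.pyRange cont0 c 1 ++ [c] := PySem.List.pyRange_one_succ_right hc
    have : s0 ++ (PySem.List.pyRange cont0 c 1).flatMap (blk s0 amigos cont0) ++ blk s0 amigos cont0 c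
        = s0 ++ (PySem.List.pyRange cont0 (c + 1) 1).flatMap (blk s0 amigos cont0) := by
      rw [hsplit]; simp
    rw [this]
    exact ih (c + 1) (by omega) (by omega)

-- ===== VERDICT =====
theorem parejas_spec : Claim_equal_parejas := by
  intro amigos cont s _ hpre
  unfold Spec_parejas parejas
  rw [B_eq]
  have h0 : PySem.List.pyRange cont cont 1 = [] := PySem.List.pyRange_one_eq_nil (le_refl _)
  have := goA_eq s amigos cont (amigos + 1 - cont).toNat cont (le_refl _) (by unfold Pre_parejas at hpre; omega)
  rw [h0] at this
  simpa using this
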